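-- pv_equiv track=rewrite | github.com/yowatanabe/learn-to-code | python/158/main.py | longest_substring_with_one_swap
-- ===== SOURCE A (Python) =====
-- from collections import defaultdict
--
-- def longest_substring_with_one_swap(s):
--     max_len = 0
--     count = defaultdict(int)
--     left = 0
--     max_count = 0
--
--     for right in range(len(s)):
--         count[s[right]] += 1
--         max_count = max(max_count, count[s[right]])
--
--         # 窓のサイズから最大出現数を引いた値が1を超えたら左を縮める
--         if (right - left + 1) - max_count > 1:
--             count[s[left]] -= 1
--             left += 1
--
--         max_len = max(max_len, right - left + 1)
--
--     return max_len
-- ===== SOURCE B (Python) =====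
-- def longest_substring_with_one_swap(s):
--     # Direct enumeration: for every start i grow the window once, keeping exact
--     # per-window character counts, and record every window that is within one
--     # character of being uniform.
--     n = len(s)
--     best = 0
--     for i in range(n):
--         counts = {}
--         best_count = 0
--         for j in range(i, n):
--             ch = s[j]
--             counts[ch] = counts.get(ch, 0) + 1
--             if counts[ch] > best_count:
--                 best_count = counts[ch]
--             if (j - i + 1) - best_count <= 1:
--                 best = max(best, j - i + 1)
--     return best
-- ===== Notes on version B (the rewrite author's own statement) =====
-- stated objective: alternative
-- what changed: Replaces the single amortized sliding-window pass (left pointer plus a lazily-maintained global max frequency) by a direct enumeration of every window start, growing each window once with exact per-window character counts and recording every window within one character of uniform.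
import Mathlib
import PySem

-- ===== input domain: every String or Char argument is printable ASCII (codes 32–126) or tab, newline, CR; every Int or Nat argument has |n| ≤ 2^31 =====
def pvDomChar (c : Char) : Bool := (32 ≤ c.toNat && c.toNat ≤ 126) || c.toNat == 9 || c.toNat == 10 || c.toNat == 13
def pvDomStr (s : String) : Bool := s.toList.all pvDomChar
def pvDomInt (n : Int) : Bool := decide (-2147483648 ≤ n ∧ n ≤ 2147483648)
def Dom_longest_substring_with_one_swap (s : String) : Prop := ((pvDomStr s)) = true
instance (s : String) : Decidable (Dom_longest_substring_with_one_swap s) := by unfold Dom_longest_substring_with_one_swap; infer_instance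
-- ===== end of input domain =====

-- B replaces A's single amortized sliding-window pass by a direct all-window enumeration with
-- exact per-window counts (alternative decomposition, not faster); return values proved equal.

-- ===== PORT A =====
-- transliteration of A's sliding-window loop; s[right]/s[left] are always in range (0 ≤ left ≤ right < len(s)), so pyGetD is exact
def longest_substring_with_one_swap (s : String) : Int :=
  let cs := s.toList
  ((PySem.List.pyRange 0 (cs.length : Int) 1).foldl (fun st right =>
      let c := PySem.List.pyGetD cs right ' '
      let count := st.2.1.insert c (st.2.1.getD c 0 + 1)
      let maxCount := max st.2.2.2 (count.getD c 0)
      let p : PySem.Dict Char Int × Int :=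
        if 1 < (right - st.2.2.1 + 1) - maxCount then
          let cl := PySem.List.pyGetD cs st.2.2.1 ' '
          (count.insert cl (count.getD cl 0 - 1), st.2.2.1 + 1)
        else (count, st.2.2.1)
      let maxLen := max st.1 (right - p.2 + 1)
      (maxLen, p.1, p.2, maxCount))
    ((0 : Int), (PySem.Dict.empty : PySem.Dict Char Int), (0 : Int), (0 : Int))).1

-- ===== PORT B =====
-- transliteration of Source B's nested enumeration; s[j] is always in range (i ≤ j < len(s)), so pyGetD is exact
def longest_substring_with_one_swap_alt (s : String) : Int :=
  let cs := s.toList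
  let n : Int := (cs.length : Int)
  (PySem.List.pyRange 0 n 1).foldl (fun best i =>
    ((PySem.List.pyRange i n 1).foldl (fun (st : PySem.Dict Char Int × Int × Int) j =>
        let ch := PySem.List.pyGetD cs j ' '
        let counts := st.1.insert ch (st.1.getD ch 0 + 1)
        let bestCount := if st.2.1 < counts.getD ch 0 then counts.getD ch 0 else st.2.1
        let best := if (j - i + 1) - bestCount ≤ 1 then max st.2.2 (j - i + 1) else st.2.2
        (counts, bestCount, best))
      ((PySem.Dict.empty : PySem.Dict Char Int), (0 : Int), best)).2.2) 0

-- ===== PRECONDITION & SPEC =====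
def Spec_longest_substring_with_one_swap (s : String) (out : Int) : Prop := out = longest_substring_with_one_swap_alt s
instance (s : String) (out : Int) : Decidable (Spec_longest_substring_with_one_swap s out) := by unfold Spec_longest_substring_with_one_swap; infer_instance

-- ===== CLAIM (what is proved, stated in full; the proofs are below) =====
def Claim_equal_longest_substring_with_one_swap : Prop := ∀ (s : String), Dom_longest_substring_with_one_swap s → Spec_longest_substring_with_one_swap s (longest_substring_with_one_swap s)

-- ===== LEMMAS AND PROOFS =====

/-! Windows: `pvWin cs i len` is the substring of `cs` of length `len` starting at `i`. -/
def pvWin (cs : List Char) (i len : ℕ) : List Char := (cs.drop i).take len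

lemma pvWin_zero (cs : List Char) (i : ℕ) : pvWin cs i 0 = [] := rfl

lemma pvWin_append (cs : List Char) {i k r : ℕ} (hik : i + k = r) (hr : r < cs.length) :
    pvWin cs i (k + 1) = pvWin cs i k ++ [cs[r]] := by
  subst hik
  unfold pvWin
  rw [List.take_add_one]
  have hk : i + k < cs.length := hr
  have : (cs.drop i)[k]? = some cs[i + k] := by
    rw [List.getElem?_drop, List.getElem?_eq_getElem hk]
  rw [this]
  rfl

lemma pvWin_cons (cs : List Char) {i : ℕ} (k : ℕ) (hi : i < cs.length) :
    pvWin cs i (k + 1) = cs[i] :: pvWin cs (i + 1) k := by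
  unfold pvWin
  rw [List.drop_eq_getElem_cons hi]
  rfl

lemma pvWin_sub (cs : List Char) {i len i' len' : ℕ} (h1 : i' ≤ i) (h2 : i + len ≤ i' + len') :
    pvWin cs i len = ((pvWin cs i' len').drop (i - i')).take len := by
  unfold pvWin
  rw [List.drop_take, List.drop_drop, List.take_take]
  have h3 : i' + (i - i') = i := by omega
  have h4 : min len (len' - (i - i')) = len := by omega
  rw [h3, h4]

lemma pvWin_count_mono (cs : List Char) (c : Char) {i len i' len' : ℕ}
    (h1 : i' ≤ i) (h2 : i + len ≤ i' + len') :
    (pvWin cs i len).count c ≤ (pvWin cs i' len').count c := by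
  rw [pvWin_sub cs h1 h2]
  exact List.Sublist.count_le c ((List.take_sublist _ _).trans (List.drop_sublist _ _))

/-! Generic fold helpers. -/
lemma pvLeFoldlSelf {α : Type} (f : Int → α → Int) :
    ∀ (l : List α) (b : Int), (∀ b x, x ∈ l → b ≤ f b x) → b ≤ l.foldl f b := by
  intro l
  induction l with
  | nil => intro b _; simp
  | cons y t ih =>
    intro b h
    simp only [List.foldl_cons]
    exact le_trans (h b y (by simp)) (ih _ (fun b x hx => h b x (by simp [hx])))

lemma pvLeFoldlOfMem {α : Type} (f : Int → α → Int) {l : List α} {x0 : α} (hx : x0 ∈ l)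
    (hmono : ∀ b x, x ∈ l → b ≤ f b x) {v : Int} (hv : ∀ b, v ≤ f b x0) :
    ∀ b, v ≤ l.foldl f b := by
  induction l with
  | nil => cases hx
  | cons y t ih =>
    intro b
    simp only [List.foldl_cons]
    rcases List.mem_cons.mp hx with h | h
    · subst h
      exact le_trans (hv b) (pvLeFoldlSelf f t _ (fun b x hx => hmono b x (by simp [hx])))
    · exact ih h (fun b x hx => hmono b x (by simp [hx])) _

lemma pvFoldlInv {α : Type} (Q : Int → Prop) (f : Int → α → Int) :
    ∀ (l : List α) (b : Int), (∀ b x, x ∈ l → Q b → Q (f b x)) → Q b → Q (l.foldl f b) := by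
  intro l
  induction l with
  | nil => intro b _ hb; simpa
  | cons y t ih =>
    intro b h hb
    simp only [List.foldl_cons]
    exact ih _ (fun b x hx => h b x (by simp [hx])) (h b y (by simp) hb)

/-! ===== A side: the sliding-window fold and its invariant ===== -/
def pvAStep (cs : List Char) (st : Int × PySem.Dict Char Int × Int × Int) (right : Int) :
    Int × PySem.Dict Char Int × Int × Int :=
  let c := PySem.List.pyGetD cs right ' '
  let count := st.2.1.insert c (st.2.1.getD c 0 + 1)
  let maxCount := max st.2.2.2 (count.getD c 0)
  let p : PySem.Dict Char Int × Int :=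
    if 1 < (right - st.2.2.1 + 1) - maxCount then
      let cl := PySem.List.pyGetD cs st.2.2.1 ' '
      (count.insert cl (count.getD cl 0 - 1), st.2.2.1 + 1)
    else (count, st.2.2.1)
  let maxLen := max st.1 (right - p.2 + 1)
  (maxLen, p.1, p.2, maxCount)

lemma portA_eq (s : String) :
    longest_substring_with_one_swap s =
      ((List.range s.toList.length).foldl (fun st (k : ℕ) => pvAStep s.toList st (k : Int))
        ((0 : Int), (PySem.Dict.empty : PySem.Dict Char Int), (0 : Int), (0 : Int))).1 := by
  simp only [longest_substring_with_one_swap, pvAStep, PySem.List.pyRange_zero_nat,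
    List.foldl_map]

def pvAInv (cs : List Char) (r : ℕ) (st : Int × PySem.Dict Char Int × Int × Int) : Prop :=
  ∃ L M : ℕ, L ≤ r ∧
    st.2.2.1 = (L : Int) ∧ st.2.2.2 = (M : Int) ∧ st.1 = ((r - L : ℕ) : Int) ∧
    (∀ c, st.2.1.getD c 0 = ((pvWin cs L (r - L)).count c : Int)) ∧
    r - L ≤ M + 1 ∧
    (∀ c, (pvWin cs L (r - L)).count c ≤ M) ∧
    (∃ i len, i + len ≤ cs.length ∧ len ≤ r - L ∧ ∃ c, M ≤ (pvWin cs i len).count c) ∧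
    (∀ i j, i ≤ j → j ≤ r → (∃ c, j - i ≤ (pvWin cs i (j - i)).count c + 1) → j - i ≤ r - L)

lemma pvAInv_init (cs : List Char) :
    pvAInv cs 0 ((0 : Int), (PySem.Dict.empty : PySem.Dict Char Int), (0 : Int), (0 : Int)) := by
  refine ⟨0, 0, le_rfl, rfl, rfl, rfl, ?_, by simp, ?_, ⟨0, 0, by simp, by simp, ⟨' ', by simp⟩⟩, ?_⟩
  · intro c; simp [pvWin_zero, PySem.Dict.getD_empty]
  · intro c; simp [pvWin_zero]
  · intro i j hij hj _; omega

lemma pvAInv_step (cs : List Char) (r : ℕ) (hr : r < cs.length)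
    (st : Int × PySem.Dict Char Int × Int × Int) (h : pvAInv cs r st) :
    pvAInv cs (r + 1) (pvAStep cs st (r : Int)) := by
  obtain ⟨L, M, hL, hLeq, hMeq, hml, hcnt, hsz, hdom, ⟨i0, len0, hi0, hlen0, c0, hc0⟩, hlb⟩ := h
  have hLlen : L < cs.length := by omega
  have hgetd_r : PySem.List.pyGetD cs ((r : ℕ) : Int) ' ' = cs[r] := by
    rw [PySem.List.pyGetD_natCast]; exact List.getD_eq_getElem cs ' ' hr
  have hgetd_L : PySem.List.pyGetD cs ((L : ℕ) : Int) ' ' = cs[L] := by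
    rw [PySem.List.pyGetD_natCast]; exact List.getD_eq_getElem cs ' ' hLlen
  have hwin1 : pvWin cs L (r - L + 1) = pvWin cs L (r - L) ++ [cs[r]] :=
    pvWin_append cs (by omega) hr
  have hwcons : pvWin cs L (r - L + 1) = cs[L] :: pvWin cs (L + 1) (r - L) :=
    pvWin_cons cs (r - L) hLlen
  set cnt1 := (pvWin cs L (r - L + 1)).count cs[r] with hcnt1
  have hc1 : cnt1 = (pvWin cs L (r - L)).count cs[r] + 1 := by
    rw [hcnt1, hwin1]; simp [List.count_append]
  have hd1' : ∀ c, (st.2.1.insert cs[r] (st.2.1.getD cs[r] 0 + 1)).getD c 0 =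
      (((pvWin cs L (r - L + 1)).count c : ℕ) : Int) := by
    intro c
    rw [PySem.Dict.getD_insert]
    by_cases hc : c = cs[r]
    · rw [if_pos hc, hc, hcnt]; omega
    · rw [if_neg hc, hcnt c, hwin1]
      have : ¬ cs[r] = c := fun hh => hc hh.symm
      simp [List.count_append, this]
  have hdom1 : ∀ c, (pvWin cs L (r - L + 1)).count c ≤ max M cnt1 := by
    intro c
    by_cases hc : c = cs[r]
    · rw [hc, ← hcnt1]; exact le_max_right _ _
    · rw [hwin1]
      have : ¬ cs[r] = c := fun hh => hc hh.symm
      simp only [List.count_append, List.count_singleton, beq_iff_eq, this, if_false,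
        Nat.add_zero]
      exact le_trans (hdom c) (le_max_left _ _)
  -- the subwindow step used by the lower-bound invariant
  have hsub : ∀ i, i ≤ r → (∃ c, r + 1 - i ≤ (pvWin cs i (r + 1 - i)).count c + 1) →
      r - i ≤ r - L := by
    intro i hir ⟨c, hc⟩
    refine hlb i r hir le_rfl ⟨c, ?_⟩
    have happ : pvWin cs i (r - i + 1) = pvWin cs i (r - i) ++ [cs[r]] :=
      pvWin_append cs (by omega) hr
    have h1 : r + 1 - i = r - i + 1 := by omega
    rw [h1, happ] at hc
    have h2 : (pvWin cs i (r - i) ++ [cs[r]]).count c ≤ (pvWin cs i (r - i)).count c + 1 := by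
      simp only [List.count_append]
      have := List.count_singleton (a := c) (b := cs[r])
      split at this <;> omega
    omega
  unfold pvAStep
  rw [hgetd_r, hLeq, hMeq, hml]
  dsimp only
  rw [hd1' cs[r], ← Nat.cast_max]
  set K := max M cnt1 with hK
  have hKM : M ≤ K := by rw [hK]; exact le_max_left _ _
  have hKc : cnt1 ≤ K := by rw [hK]; exact le_max_right _ _
  have hKch : K = M ∨ K = cnt1 := by rw [hK]; exact max_choice _ _
  by_cases hsh : K < r - L
  · -- shrink: the window slides one step right
    rw [if_pos (by omega)]
    rw [hgetd_L]
    refine ⟨L + 1, K, by omega, by push_cast [Nat.cast_add]; ring, rfl, ?_, ?_, by omega, ?_, ?_, ?_⟩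
    · -- max_len component
      show max (((r - L : ℕ) : ℕ) : Int) (((r : ℕ) : Int) - (((L : ℕ) : Int) + 1) + 1) = _
      have h1 : ((r : ℕ) : Int) - (((L : ℕ) : Int) + 1) + 1 = (((r - L : ℕ) : ℕ) : Int) := by
        omega
      rw [h1, max_self]
      congr 1; omega
    · -- counts describe the new window
      intro c
      show ((st.2.1.insert cs[r] (st.2.1.getD cs[r] 0 + 1)).insert cs[L]
        ((st.2.1.insert cs[r] (st.2.1.getD cs[r] 0 + 1)).getD cs[L] 0 - 1)).getD c 0 = _
      rw [PySem.Dict.getD_insert]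
      have hreidx : r + 1 - (L + 1) = r - L := by omega
      rw [hreidx]
      by_cases hcL : c = cs[L]
      · rw [if_pos hcL, hd1' cs[L], hcL]
        have hcc : (pvWin cs L (r - L + 1)).count cs[L] =
            (pvWin cs (L + 1) (r - L)).count cs[L] + 1 := by
          rw [hwcons]; simp
        omega
      · rw [if_neg hcL, hd1' c]
        have hcc : (pvWin cs L (r - L + 1)).count c = (pvWin cs (L + 1) (r - L)).count c := by
          rw [hwcons]
          have : ¬ cs[L] = c := fun hh => hcL hh.symm
          simp [this]
        rw [hcc]
    · -- every count in the new window is at most K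
      intro c
      have h1 : (pvWin cs (L + 1) (r + 1 - (L + 1))).count c ≤ (pvWin cs L (r - L + 1)).count c := by
        have hreidx : r + 1 - (L + 1) = r - L := by omega
        rw [hreidx, hwcons, List.count_cons]
        split <;> omega
      exact le_trans h1 (hdom1 c)
    · -- the max-count witness window (K = M here)
      have hKM' : K = M := by omega
      exact ⟨i0, len0, hi0, by omega, c0, by omega⟩
    · -- lower bound: no valid window is longer than the new window
      intro i j hij hj hval
      rcases Nat.lt_or_ge j (r + 1) with hjr | hjr
      · have := hlb i j hij (by omega) hval
        omega
      · have hjq : j = r + 1 := by omega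
        subst hjq
        rcases Nat.lt_or_ge i (r + 1) with hirr | hirr
        · have hir : i ≤ r := by omega
          have h1 := hsub i hir hval
          -- i cannot equal L: the full window [L, r] ++ [r] would have K ≥ r - L
          rcases Nat.lt_or_ge L i with hLi | hLi
          · omega
          · have hiL : i = L := by omega
            exfalso
            subst hiL
            obtain ⟨c, hc⟩ := hval
            have h2 : r + 1 - i = r - i + 1 := by omega
            rw [h2] at hc
            have h3 := hdom1 c
            omega
        · omega
  · -- no shrink: the window grows by one
    rw [if_neg (by omega)]
    refine ⟨L, K, by omega, rfl, rfl, ?_, ?_, by omega, ?_, ?_, ?_⟩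
    · -- max_len component
      show max (((r - L : ℕ) : ℕ) : Int) (((r : ℕ) : Int) - ((L : ℕ) : Int) + 1) = _
      have h1 : ((r : ℕ) : Int) - ((L : ℕ) : Int) + 1 = (((r + 1 - L : ℕ) : ℕ) : Int) := by
        omega
      rw [h1]
      rw [max_eq_right (by exact_mod_cast (by omega : (r - L : ℕ) ≤ (r + 1 - L : ℕ)))]
    · -- counts describe the grown window
      intro c
      show (st.2.1.insert cs[r] (st.2.1.getD cs[r] 0 + 1)).getD c 0 = _
      rw [hd1' c]
      have hreidx : r + 1 - L = r - L + 1 := by omega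
      rw [hreidx]
    · -- dominance
      intro c
      have hreidx : r + 1 - L = r - L + 1 := by omega
      rw [hreidx]
      exact hdom1 c
    · -- max-count witness
      rcases hKch with hKM' | hKc'
      · exact ⟨i0, len0, hi0, by omega, c0, by omega⟩
      · refine ⟨L, r - L + 1, by omega, by omega, cs[r], by omega⟩
    · -- lower bound
      intro i j hij hj hval
      rcases Nat.lt_or_ge j (r + 1) with hjr | hjr
      · have := hlb i j hij (by omega) hval
        omega
      · have hjq : j = r + 1 := by omega
        subst hjq
        rcases Nat.lt_or_ge i (r + 1) with hirr | hirr
        · have h1 := hsub i (by omega) hval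
          omega
        · omega

lemma pvA_fold (cs : List Char) :
    ∀ r, r ≤ cs.length →
      pvAInv cs r ((List.range r).foldl (fun st (k : ℕ) => pvAStep cs st (k : Int))
        ((0 : Int), (PySem.Dict.empty : PySem.Dict Char Int), (0 : Int), (0 : Int))) := by
  intro r
  induction r with
  | zero => intro _; simpa using pvAInv_init cs
  | succ n ih =>
    intro hn
    rw [List.range_succ, List.foldl_append]
    exact pvAInv_step cs n (by omega) _ (ih (by omega))

/-! ===== B side: the all-window enumeration fold ===== -/
def pvBStepN (cs : List Char) (i : ℕ) (st : PySem.Dict Char Int × Int × Int) (k : ℕ) :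
    PySem.Dict Char Int × Int × Int :=
  let ch := cs.getD (i + k) ' '
  let counts := st.1.insert ch (st.1.getD ch 0 + 1)
  let bestCount := if st.2.1 < counts.getD ch 0 then counts.getD ch 0 else st.2.1
  let best := if ((k : Int) + 1) - bestCount ≤ 1 then max st.2.2 ((k : Int) + 1) else st.2.2
  (counts, bestCount, best)

def pvBOuter (cs : List Char) (b : Int) (i : ℕ) : Int :=
  ((List.range' 0 (cs.length - i)).foldl (pvBStepN cs i)
    ((PySem.Dict.empty : PySem.Dict Char Int), (0 : Int), b)).2.2

lemma portB_eq (s : String) :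
    longest_substring_with_one_swap_alt s =
      (List.range s.toList.length).foldl (pvBOuter s.toList) 0 := by
  simp only [longest_substring_with_one_swap_alt, PySem.List.pyRange_zero_nat, List.foldl_map]
  refine PySem.List.foldl_congr_mem _ _ _ _ ?_
  intro best i hi
  rw [List.mem_range] at hi
  rw [PySem.List.pyRange_one, List.foldl_map]
  unfold pvBOuter
  have hn : ((s.toList.length : Int) - (i : Int)).toNat = s.toList.length - i := by omega
  rw [hn, ← List.range_eq_range']
  refine congrArg (fun st : PySem.Dict Char Int × Int × Int => st.2.2) ?_
  refine PySem.List.foldl_congr_mem _ _ _ _ ?_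
  intro st k hk
  show _ = pvBStepN s.toList i st k
  unfold pvBStepN
  have h1 : (i : Int) + (k : Int) = ((i + k : ℕ) : Int) := by push_cast; ring
  rw [h1, PySem.List.pyGetD_natCast]
  have h2 : ((i + k : ℕ) : Int) - (i : Int) + 1 = (k : Int) + 1 := by push_cast; ring
  rw [h2]

def pvBInner (cs : List Char) (i m : ℕ) (st : PySem.Dict Char Int × Int × Int) : Prop :=
  ∃ BC : ℕ, st.2.1 = (BC : Int) ∧
    (∀ c, st.1.getD c 0 = ((pvWin cs i m).count c : Int)) ∧
    (∀ c, (pvWin cs i m).count c ≤ BC) ∧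
    (BC = 0 ∨ ∃ c, BC = (pvWin cs i m).count c)

def pvQ (cs : List Char) (b : Int) : Prop :=
  b = 0 ∨ ∃ i len, i + len ≤ cs.length ∧ 1 ≤ len ∧
    (∃ c, len ≤ (pvWin cs i len).count c + 1) ∧ b = (len : Int)

lemma pvB_go (cs : List Char) (i : ℕ) :
    ∀ (cnt m : ℕ) (st : PySem.Dict Char Int × Int × Int),
      i + m + cnt ≤ cs.length → pvBInner cs i m st →
      (pvQ cs st.2.2 → pvQ cs (((List.range' m cnt).foldl (pvBStepN cs i) st).2.2)) ∧
      st.2.2 ≤ ((List.range' m cnt).foldl (pvBStepN cs i) st).2.2 ∧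
      (∀ len, m < len → len ≤ m + cnt → (∃ c, len ≤ (pvWin cs i len).count c + 1) →
        ((len : ℕ) : Int) ≤ ((List.range' m cnt).foldl (pvBStepN cs i) st).2.2) := by
  intro cnt
  induction cnt with
  | zero =>
    intro m st _ _
    simp only [List.range'_zero, List.foldl_nil]
    exact ⟨id, le_refl _, fun len h1 h2 _ => absurd h2 (by omega)⟩
  | succ cnt ih =>
    intro m st hle hinv
    rw [List.range'_succ]
    simp only [List.foldl_cons]
    obtain ⟨BC, hbc, hcnt, hdom, hach⟩ := hinv
    have him : i + m < cs.length := by omega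
    have hwin : pvWin cs i (m + 1) = pvWin cs i m ++ [cs[i + m]] := pvWin_append cs rfl him
    set ch := cs[i + m] with hch
    set cnt1 := (pvWin cs i (m + 1)).count ch with hcnt1
    have hc1 : cnt1 = (pvWin cs i m).count ch + 1 := by
      rw [hcnt1, hwin]; simp [List.count_append]
    have hcmono : ∀ c, (pvWin cs i m).count c ≤ (pvWin cs i (m + 1)).count c := by
      intro c; rw [hwin]; simp [List.count_append]
    -- characterize the step
    set st' := pvBStepN cs i st m with hst'
    have hgetd : cs.getD (i + m) ' ' = ch := List.getD_eq_getElem cs ' ' him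
    have hcnt' : ∀ c, st'.1.getD c 0 = ((pvWin cs i (m + 1)).count c : Int) := by
      intro c
      show (st.1.insert (cs.getD (i + m) ' ') (st.1.getD (cs.getD (i + m) ' ') 0 + 1)).getD c 0 = _
      rw [hgetd, PySem.Dict.getD_insert]
      by_cases hc : c = ch
      · subst hc; rw [if_pos rfl, hcnt]; omega
      · rw [if_neg hc, hcnt c, hwin]
        have : ¬ ch = c := fun h => hc h.symm
        simp [List.count_append, this]
    set BC' := max BC cnt1 with hBC'
    have hbc' : st'.2.1 = (BC' : Int) := by
      have h1 : st'.2.1 = if st.2.1 < st'.1.getD (cs.getD (i + m) ' ') 0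
          then st'.1.getD (cs.getD (i + m) ' ') 0 else st.2.1 := rfl
      rw [h1, hgetd, hcnt' ch, hbc, ← hcnt1]
      by_cases h : BC < cnt1
      · rw [if_pos (by exact_mod_cast h)]
        congr 1; omega
      · rw [if_neg (by exact_mod_cast h)]
        congr 1; omega
    have hdom' : ∀ c, (pvWin cs i (m + 1)).count c ≤ BC' := by
      intro c
      by_cases hc : c = ch
      · subst hc; exact le_max_right _ _
      · rw [hwin]
        have : ¬ ch = c := fun h => hc h.symm
        simp only [List.count_append, List.count_singleton, beq_iff_eq, this, if_false,
          Nat.add_zero]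
        exact le_trans (hdom c) (le_max_left _ _)
    have hach' : BC' = 0 ∨ ∃ c, BC' = (pvWin cs i (m + 1)).count c := by
      rcases le_total BC cnt1 with h | h
      · exact Or.inr ⟨ch, by omega⟩
      · rcases hach with h0 | ⟨c, hc⟩
        · exact Or.inr ⟨ch, by omega⟩
        · refine Or.inr ⟨c, ?_⟩
          have h1 := hcmono c
          have h2 := hdom' c
          omega
    have hbest : st'.2.2 = if ((m : Int) + 1) - st'.2.1 ≤ 1 then max st.2.2 ((m : Int) + 1)
        else st.2.2 := rfl
    have hinv' : pvBInner cs i (m + 1) st' := ⟨BC', hbc', hcnt', hdom', hach'⟩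
    obtain ⟨ihQ, ihmono, ihreach⟩ := ih (m + 1) st' (by omega) hinv'
    have hmono1 : st.2.2 ≤ st'.2.2 := by
      rw [hbest]; split
      · exact le_max_left _ _
      · exact le_refl _
    have hreach1 : (∃ c, m + 1 ≤ (pvWin cs i (m + 1)).count c + 1) →
        (((m : ℕ) : Int) + 1) ≤ st'.2.2 := by
      rintro ⟨c, hc⟩
      have h1 : m ≤ BC' := le_trans (by omega) (hdom' c)
      rw [hbest, hbc', if_pos (by exact_mod_cast (by omega : (m : Int) + 1 - (BC' : Int) ≤ 1))]
      exact le_max_right _ _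
    have hQ1 : pvQ cs st.2.2 → pvQ cs st'.2.2 := by
      intro hq
      rw [hbest]; split
      · rename_i hcond
        rcases max_choice st.2.2 ((m : Int) + 1) with h | h
        · rw [h]; exact hq
        · rw [h]
          refine Or.inr ⟨i, m + 1, by omega, by omega, ?_, by push_cast; ring⟩
          rw [hbc'] at hcond
          have hm : m ≤ BC' := by exact_mod_cast (by omega : (m : Int) ≤ (BC' : Int))
          rcases hach' with h0 | ⟨c, hc⟩
          · exact ⟨ch, by omega⟩
          · exact ⟨c, by omega⟩
      · exact hq
    refine ⟨fun hq => ihQ (hQ1 hq), le_trans hmono1 ihmono, ?_⟩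
    intro len h1 h2 hval
    rcases eq_or_lt_of_le (Nat.succ_le_of_lt h1) with h | h
    · have : len = m + 1 := h.symm
      subst this
      exact le_trans (by exact_mod_cast hreach1 (by exact_mod_cast hval)) ihmono
    · exact ihreach len (by omega) (by omega) hval

/-! ===== assembling the equivalence ===== -/
lemma pvB_nonneg (cs : List Char) : (0 : Int) ≤ (List.range cs.length).foldl (pvBOuter cs) 0 := by
  refine pvLeFoldlSelf _ _ _ ?_
  intro b i hi
  rw [List.mem_range] at hi
  unfold pvBOuter
  have := pvB_go cs i (cs.length - i) 0 ((PySem.Dict.empty : PySem.Dict Char Int), (0 : Int), b)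
    (by omega) ?_
  · exact this.2.1
  · exact ⟨0, rfl, by intro c; simp [pvWin_zero, PySem.Dict.getD_empty],
      by intro c; simp [pvWin_zero], Or.inl rfl⟩

lemma pvBInner_init (cs : List Char) (i : ℕ) (b : Int) :
    pvBInner cs i 0 ((PySem.Dict.empty : PySem.Dict Char Int), (0 : Int), b) :=
  ⟨0, rfl, by intro c; simp [pvWin_zero, PySem.Dict.getD_empty],
    by intro c; simp [pvWin_zero], Or.inl rfl⟩

lemma pvB_reach (cs : List Char) {i len : ℕ} (hin : i + len ≤ cs.length) (hlen : 1 ≤ len)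
    (hval : ∃ c, len ≤ (pvWin cs i len).count c + 1) :
    ((len : ℕ) : Int) ≤ (List.range cs.length).foldl (pvBOuter cs) 0 := by
  have hi : i < cs.length := by omega
  refine pvLeFoldlOfMem (pvBOuter cs) (List.mem_range.mpr hi) ?_ ?_ 0
  · intro b j hj
    rw [List.mem_range] at hj
    exact (pvB_go cs j (cs.length - j) 0 _ (by omega) (pvBInner_init cs j b)).2.1
  · intro b
    exact (pvB_go cs i (cs.length - i) 0 _ (by omega) (pvBInner_init cs i b)).2.2
      len (by omega) (by omega) hval

lemma pvB_Q (cs : List Char) : pvQ cs ((List.range cs.length).foldl (pvBOuter cs) 0) := by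
  refine pvFoldlInv (pvQ cs) (pvBOuter cs) _ _ ?_ (Or.inl rfl)
  intro b i hi hb
  rw [List.mem_range] at hi
  exact (pvB_go cs i (cs.length - i) 0 _ (by omega) (pvBInner_init cs i b)).1 hb

-- ===== VERDICT (by name: the statement is the Claim_ definition above) =====
theorem longest_substring_with_one_swap_spec : Claim_equal_longest_substring_with_one_swap := by
  intro s _
  unfold Spec_longest_substring_with_one_swap
  rw [portA_eq, portB_eq]
  set cs := s.toList with hcs
  set n := cs.length with hn
  obtain ⟨L, M, hL, _, _, hml, _, hsz, hdom, ⟨i0, len0, hi0, hlen0, c0, hc0⟩, hlb⟩ :=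
    pvA_fold cs n le_rfl
  rw [hml]
  apply le_antisymm
  · -- A ≤ B
    by_cases h0 : n - L = 0
    · rw [h0]; exact_mod_cast pvB_nonneg cs
    · -- extend the max-count witness window to one of length n - L
      set σ := n - L with hσ
      have hσn : σ ≤ n := by omega
      set i' := min i0 (n - σ) with hi'
      have h1 : i' + σ ≤ n := by omega
      have h2 : (pvWin cs i0 len0).count c0 ≤ (pvWin cs i' σ).count c0 := by
        refine pvWin_count_mono cs c0 (by omega) ?_
        rcases le_total i0 (n - σ) with h | h
        · have : i' = i0 := by omega
          omega
        · have : i' = n - σ := by omega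
          omega
      refine pvB_reach cs h1 (by omega) ⟨c0, by omega⟩
  · -- B ≤ A
    rcases pvB_Q cs with h | ⟨i, len, hin, hlen, ⟨c, hc⟩, hb⟩
    · rw [h]; positivity
    · rw [hb]
      have := hlb i (i + len) (by omega) (by omega) ⟨c, by simpa using hc⟩
      have hle : len ≤ n - L := by simpa using this
      exact_mod_cast hle
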